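-- pv_equiv track=rewrite | github.com/powerof3/MainMenuVideo | scripts/core/clang_types.py | _split_ns
-- ===== SOURCE A (Python) =====
-- def _split_ns(qualified):
--     """Split a qualified C++ name on :: boundaries, respecting template <> nesting."""
--     parts = []
--     depth = 0
--     start = 0
--     i = 0
--     while i < len(qualified):
--         c = qualified[i]
--         if c == '<':
--             depth += 1
--         elif c == '>':
--             depth -= 1
--         elif c == ':' and depth == 0 and i + 1 < len(qualified) and qualified[i + 1] == ':':
--             parts.append(qualified[start:i])
--             i += 2
--             start = i
--             continue
--         i += 1
--     parts.append(qualified[start:])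
--     return parts
-- ===== SOURCE B (Python) =====
-- def _split_ns(qualified):
--     """Split a qualified C++ name on :: boundaries, respecting template <> nesting."""
--     parts = []
--     depth = 0
--     current = None
--     for frag in qualified.split('::'):
--         current = frag if current is None else current + '::' + frag
--         depth += frag.count('<') - frag.count('>')
--         if depth == 0:
--             parts.append(current)
--             current = None
--     if current is not None:
--         parts.append(current)
--     return parts
-- ===== Notes on version B (the rewrite author's own statement) =====
-- stated objective: faster
-- what changed: Replaces A's per-character index loop (manual separator detection and slicing) by one call to str.split on the double-colon separator followed by a single fold that re-joins fragments while a cumulative angle-bracket depth counter is nonzero.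
import Mathlib
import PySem

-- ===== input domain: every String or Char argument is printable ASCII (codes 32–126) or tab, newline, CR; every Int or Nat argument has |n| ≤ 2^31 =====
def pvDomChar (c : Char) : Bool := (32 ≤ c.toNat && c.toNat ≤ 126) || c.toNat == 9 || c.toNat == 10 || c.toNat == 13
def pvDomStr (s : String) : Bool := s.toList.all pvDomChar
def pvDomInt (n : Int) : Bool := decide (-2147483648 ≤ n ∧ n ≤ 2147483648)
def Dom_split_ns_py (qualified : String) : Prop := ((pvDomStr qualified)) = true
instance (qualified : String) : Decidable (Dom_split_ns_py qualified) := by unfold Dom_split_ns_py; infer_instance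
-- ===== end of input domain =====

-- B replaces A's per-character index/slice scan by a library split on the double-colon
-- separator followed by a single depth-counting recombination fold (measured faster by a
-- constant factor: the separator scan runs in the C library).

-- ===== PORT A =====
-- A's while-loop over character indices, ported on the code-point list (indices and
-- slices via PySem.List; exact).  State = (parts, depth, start, i).
def splitNsLoop (s : List Char) : Nat → List (List Char) → Int → Nat → Nat → List (List Char)
  | 0, parts, _, start, _ => parts ++ [PySem.List.slice s (some (start : Int)) none]
  | fuel + 1, parts, depth, start, i =>
    if h : i < s.length then
      let c := s[i]
      if c = '<' then splitNsLoop s fuel parts (depth + 1) start (i + 1)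
      else if c = '>' then splitNsLoop s fuel parts (depth - 1) start (i + 1)
      else if c = ':' ∧ depth = 0 ∧ i + 1 < s.length ∧
          PySem.List.pyGet? s ((i : Int) + 1) = some ':' then
        splitNsLoop s fuel (parts ++ [PySem.List.slice s (some (start : Int)) (some (i : Int))])
          depth (i + 2) (i + 2)
      else splitNsLoop s fuel parts depth start (i + 1)
    else parts ++ [PySem.List.slice s (some (start : Int)) none]

def split_ns_py (qualified : String) : List String :=
  (splitNsLoop qualified.toList (qualified.toList.length + 1) [] 0 0 0).map String.ofList

-- ===== PORT B =====
-- one step of B's for-loop over the fragments of qualified.split('::');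
-- state = (parts, depth, current : Option)
def splitNsStep (st : List (List Char) × Int × Option (List Char)) (frag : List Char) :
    List (List Char) × Int × Option (List Char) :=
  let current := match st.2.2 with
    | none => frag
    | some p => p ++ [':', ':'] ++ frag
  let depth := st.2.1 + ((PySem.Chars.count frag ['<'] : Int) - (PySem.Chars.count frag ['>'] : Int))
  if depth = 0 then (st.1 ++ [current], depth, none) else (st.1, depth, some current)

def split_ns_py_alt (qualified : String) : List String :=
  let st := (PySem.Chars.splitOn qualified.toList [':', ':']).foldl splitNsStep ([], 0, none)
  (match st.2.2 with
    | none => st.1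
    | some c => st.1 ++ [c]).map String.ofList

-- ===== PRECONDITION & SPEC =====
def Spec_split_ns_py (qualified : String) (out : List String) : Prop := out = split_ns_py_alt qualified
instance (qualified : String) (out : List String) : Decidable (Spec_split_ns_py qualified out) := by unfold Spec_split_ns_py; infer_instance

-- ===== CLAIM (what is proved, stated in full; the proofs are below) =====
def Claim_equal_split_ns_py : Prop := ∀ (qualified : String), Dom_split_ns_py qualified → Spec_split_ns_py qualified (split_ns_py qualified)

-- ===== LEMMAS AND PROOFS =====

-- prepend a prefix onto the first element of a list of segments
def prependHead (p : List Char) : List (List Char) → List (List Char)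
  | [] => [p]
  | x :: xs => (p ++ x) :: xs

-- common reference: split on '::' at template depth 0, char by char
def nsSpec : List Char → Int → List (List Char)
  | [], _ => [[]]
  | c :: rest, d =>
    if c = ':' ∧ d = 0 ∧ rest.head? = some ':' then
      [] :: nsSpec rest.tail d
    else if c = '<' then prependHead [c] (nsSpec rest (d + 1))
    else if c = '>' then prependHead [c] (nsSpec rest (d - 1))
    else prependHead [c] (nsSpec rest d)
termination_by l _ => l.length
decreasing_by all_goals (simp [List.length_tail]; try omega)

-- the fragments of  l.split('::')  (leftmost, non-overlapping)
def nsFrag : List Char → List (List Char)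
  | [] => [[]]
  | c :: rest =>
    if c = ':' ∧ rest.head? = some ':' then [] :: nsFrag rest.tail
    else prependHead [c] (nsFrag rest)
termination_by l => l.length
decreasing_by all_goals (simp [List.length_tail]; try omega)

-- cumulative '<' minus '>' balance of a fragment
def nsDelta (l : List Char) : Int := (l.count '<' : Int) - (l.count '>' : Int)

-- B's trailing-current flush
def finishB (st : List (List Char) × Int × Option (List Char)) : List (List Char) :=
  match st.2.2 with
  | none => st.1
  | some c => st.1 ++ [c]

-- pending current, as a transformation of the remaining segments
def pend2 : Option (List Char) → List (List Char) → List (List Char)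
  | none, L => L
  | some p, L => prependHead (p ++ [':', ':']) L

lemma prependHead_ne_nil (p : List Char) (L : List (List Char)) : prependHead p L ≠ [] := by
  cases L <;> simp [prependHead]

lemma prependHead_prependHead (p q : List Char) (L : List (List Char)) :
    prependHead p (prependHead q L) = prependHead (p ++ q) L := by
  cases L <;> simp [prependHead]

lemma prependHead_nil (L : List (List Char)) (h : L ≠ []) : prependHead [] L = L := by
  cases L with
  | nil => exact absurd rfl h
  | cons x xs => simp [prependHead]

lemma nsSpec_ne_nil (l : List Char) (d : Int) : nsSpec l d ≠ [] := by
  cases l with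
  | nil => simp [nsSpec]
  | cons c rest =>
    rw [nsSpec]
    split_ifs <;> simp [prependHead_ne_nil]

lemma nsFrag_ne_nil (l : List Char) : nsFrag l ≠ [] := by
  cases l with
  | nil => simp [nsFrag]
  | cons c rest =>
    rw [nsFrag]
    split_ifs <;> simp [prependHead_ne_nil]

lemma countGo_singleton (c : Char) : ∀ (fuel : Nat) (l : List Char) (acc : Nat),
    l.length ≤ fuel → PySem.Chars.count.go [c] fuel l acc = acc + l.count c := by
  intro fuel
  induction fuel with
  | zero =>
    intro l acc h
    have : l = [] := List.eq_nil_of_length_eq_zero (Nat.le_zero.mp h)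
    subst this
    simp [PySem.Chars.count.go]
  | succ f ih =>
    intro l acc h
    cases l with
    | nil => simp [PySem.Chars.count.go]
    | cons a rest =>
      rw [PySem.Chars.count.go]
      by_cases hp : [c].isPrefixOf (a :: rest) = true
      · have ha : c = a := by
          simpa [List.isPrefixOf] using hp
        subst ha
        simp only [hp, if_pos, List.length_cons, List.drop_succ_cons, List.length_nil,
          List.drop_zero]
        rw [ih rest (acc + 1) (by simpa using h)]
        simp
        omega
      · have ha : ¬ a = c := by
          intro hac; exact hp (by simp [hac, List.isPrefixOf])
        simp only [hp]
        rw [ih rest acc (by simpa using h)]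
        simp [ha]

lemma count_singleton (l : List Char) (c : Char) : PySem.Chars.count l [c] = l.count c := by
  rw [PySem.Chars.count]
  simp only [List.isEmpty_cons, if_false, Bool.false_eq_true]
  exact (countGo_singleton c l.length l 0 le_rfl).trans (by omega)

lemma nsDelta_nil : nsDelta [] = 0 := by simp [nsDelta]

lemma nsDelta_cons (c : Char) (l : List Char) :
    nsDelta (c :: l) = (if c = '<' then 1 else if c = '>' then -1 else 0) + nsDelta l := by
  simp only [nsDelta, List.count_cons]
  split_ifs with h1 h2 <;> simp_all <;> omega

lemma pairPrefix_iff (c : Char) (rest : List Char) :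
    [':', ':'].isPrefixOf (c :: rest) = true ↔ (c = ':' ∧ rest.head? = some ':') := by
  cases rest <;> simp [List.isPrefixOf]
  constructor <;> rintro ⟨h1, h2⟩ <;> exact ⟨h1.symm, h2.symm⟩

-- splitOn's fueled worker, characterised
lemma splitOnGo_eq : ∀ (fuel : Nat) (l cur : List Char) (acc : List (List Char)),
    l.length < fuel →
    PySem.Chars.splitOn.go [':', ':'] fuel l cur acc =
      acc.reverse ++ prependHead cur.reverse (nsFrag l) := by
  intro fuel
  induction fuel with
  | zero => intro l cur acc h; omega
  | succ f ih =>
    intro l cur acc h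
    cases l with
    | nil =>
      rw [PySem.Chars.splitOn.go]
      simp [nsFrag, prependHead]
      omega
    | cons c rest =>
      rw [PySem.Chars.splitOn.go]
      by_cases hp : [':', ':'].isPrefixOf (c :: rest) = true
      · obtain ⟨hc, hh⟩ := (pairPrefix_iff c rest).mp hp
        cases rest with
        | nil => simp at hh
        | cons c2 rest2 =>
          have hc2 : c2 = ':' := by simpa using hh
          subst hc hc2
          simp only [hp, if_pos, List.length_cons, List.drop_succ_cons, List.length_nil,
            List.drop_zero]
          rw [ih rest2 [] (cur.reverse :: acc) (by simp at h ⊢; omega)]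
          rw [nsFrag]
          simp only [List.head?_cons, and_self, if_pos, List.tail_cons, List.reverse_cons,
            List.reverse_nil]
          rw [prependHead_nil _ (nsFrag_ne_nil rest2)]
          cases hf : nsFrag rest2 with
          | nil => exact absurd hf (nsFrag_ne_nil rest2)
          | cons x xs => simp [prependHead]
      · simp only [hp, Bool.false_eq_true, if_false]
        rw [ih rest (c :: cur) acc (by simp at h ⊢; omega)]
        rw [nsFrag]
        have hg : ¬ (c = ':' ∧ rest.head? = some ':') := fun hx => hp ((pairPrefix_iff c rest).mpr hx)
        rw [if_neg hg, List.reverse_cons, prependHead_prependHead]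

lemma splitOn_eq_nsFrag (l : List Char) :
    PySem.Chars.splitOn l [':', ':'] = nsFrag l := by
  rw [show PySem.Chars.splitOn l [':', ':'] =
      PySem.Chars.splitOn.go [':', ':'] (l.length + 1) l [] [] from rfl]
  rw [splitOnGo_eq (l.length + 1) l [] [] (by omega)]
  simp only [List.reverse_nil, List.nil_append]
  exact prependHead_nil _ (nsFrag_ne_nil l)

lemma head_infix_of_guard (c : Char) (rest : List Char) (hc : c = ':')
    (hh : rest.head? = some ':') : [':', ':'] <:+: c :: rest := by
  cases rest with
  | nil => simp at hh
  | cons c2 rest2 =>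
    have : c2 = ':' := by simpa using hh
    subst hc this
    exact ((List.prefix_append _ rest2).isInfix)

lemma nsFrag_of_not_infix (l : List Char) (h : ¬ [':', ':'] <:+: l) : nsFrag l = [l] := by
  induction l with
  | nil => simp [nsFrag]
  | cons c rest ih =>
    rw [nsFrag]
    have hg : ¬ (c = ':' ∧ rest.head? = some ':') :=
      fun hx => h (head_infix_of_guard c rest hx.1 hx.2)
    rw [if_neg hg, ih (fun hx => h (List.infix_cons_iff.mpr (Or.inr hx)))]
    simp [prependHead]

lemma nsSpec_of_not_infix (l : List Char) (h : ¬ [':', ':'] <:+: l) (d : Int) :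
    nsSpec l d = [l] := by
  induction l generalizing d with
  | nil => simp [nsSpec]
  | cons c rest ih =>
    rw [nsSpec]
    have hg : ¬ (c = ':' ∧ d = 0 ∧ rest.head? = some ':') :=
      fun hx => h (head_infix_of_guard c rest hx.1 hx.2.2)
    have hr : ¬ [':', ':'] <:+: rest := fun hx => h (List.infix_cons_iff.mpr (Or.inr hx))
    rw [if_neg hg]
    split_ifs <;> rw [ih hr] <;> simp [prependHead]

lemma infix_decomp (l : List Char) (h : [':', ':'] <:+: l) :
    ∃ u v, l = u ++ [':', ':'] ++ v ∧ ¬ [':', ':'] <:+: (u ++ [':']) := by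
  induction l with
  | nil => simp at h
  | cons c rest ih =>
    by_cases hg : c = ':' ∧ rest.head? = some ':'
    · obtain ⟨hc, hh⟩ := hg
      cases rest with
      | nil => simp at hh
      | cons c2 rest2 =>
        have hc2 : c2 = ':' := by simpa using hh
        subst hc hc2
        exact ⟨[], rest2, by simp, by decide⟩
    · rcases List.infix_cons_iff.mp h with hpre | hinf
      · exact absurd ⟨(List.cons_prefix_cons.mp hpre).1.symm, by
          rcases List.cons_prefix_cons.mp hpre with ⟨-, h2⟩
          cases rest with
          | nil => simp at h2
          | cons c2 rest2 => simpa using ((List.cons_prefix_cons.mp h2).1).symm⟩ hg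
      · obtain ⟨u, v, huv, hu⟩ := ih hinf
        refine ⟨c :: u, v, by simp [huv], ?_⟩
        intro hx
        rcases List.infix_cons_iff.mp hx with hpre | hinf2
        · obtain ⟨hc, h2⟩ := List.cons_prefix_cons.mp hpre
          apply hg
          constructor
          · exact hc.symm
          · rw [huv]
            cases u with
            | nil => simp
            | cons a u2 =>
              have : a = ':' := by simpa using ((List.cons_prefix_cons.mp h2).1).symm
              simp [this]
        · exact hu hinf2

lemma nsFrag_append (u v : List Char) (hu : ¬ [':', ':'] <:+: (u ++ [':'])) :
    nsFrag (u ++ [':', ':'] ++ v) = u :: nsFrag v := by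
  induction u with
  | nil =>
    simp only [List.nil_append]
    rw [nsFrag.eq_def]
    simp
  | cons c u2 ih =>
    have hu2 : ¬ [':', ':'] <:+: (u2 ++ [':']) := fun hx => hu (List.infix_cons_iff.mpr (Or.inr hx))
    have hg : ¬ (c = ':' ∧ (u2 ++ [':', ':'] ++ v).head? = some ':') := by
      rintro ⟨hc, hh⟩
      apply hu
      apply head_infix_of_guard c (u2 ++ [':']) hc
      cases u2 with
      | nil => simp
      | cons a u3 => simpa using hh
    rw [show (c :: u2) ++ [':', ':'] ++ v = c :: (u2 ++ [':', ':'] ++ v) by simp]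
    rw [nsFrag]
    rw [if_neg hg, ih hu2]
    simp [prependHead]

lemma nsSpec_colon (t : List Char) (d : Int) (hd : d ≠ 0) :
    nsSpec (':' :: t) d = prependHead [':'] (nsSpec t d) := by
  rw [nsSpec.eq_def]
  simp [hd]

lemma nsSpec_append (u : List Char) (hu : ¬ [':', ':'] <:+: (u ++ [':'])) :
    ∀ (v : List Char) (d : Int),
    nsSpec (u ++ [':', ':'] ++ v) d =
      if d + nsDelta u = 0 then u :: nsSpec v (d + nsDelta u)
      else prependHead (u ++ [':', ':']) (nsSpec v (d + nsDelta u)) := by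
  induction u with
  | nil =>
    intro v d
    simp only [List.nil_append, nsDelta_nil, add_zero]
    by_cases hd : d = 0
    · subst hd
      rw [nsSpec.eq_def]
      simp
    · rw [if_neg hd, List.cons_append, List.singleton_append, nsSpec_colon _ _ hd, nsSpec_colon _ _ hd, prependHead_prependHead]
      rfl
  | cons c u2 ih =>
    intro v d
    have hu2 : ¬ [':', ':'] <:+: (u2 ++ [':']) :=
      fun hx => hu (List.infix_cons_iff.mpr (Or.inr hx))
    have hg : ∀ e : Int, ¬ (c = ':' ∧ e = 0 ∧ (u2 ++ [':', ':'] ++ v).head? = some ':') := by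
      rintro e ⟨hc, -, hh⟩
      apply hu
      apply head_infix_of_guard c (u2 ++ [':']) hc
      cases u2 with
      | nil => simp
      | cons a u3 => simpa using hh
    have hstep : ∀ e : Int, nsSpec (c :: (u2 ++ [':', ':'] ++ v)) e =
        prependHead [c] (nsSpec (u2 ++ [':', ':'] ++ v)
          (if c = '<' then e + 1 else if c = '>' then e - 1 else e)) := by
      intro e
      rw [nsSpec.eq_def]
      simp only [hg e, if_false]
      split_ifs with h1 h2 <;> simp_all
    rw [show (c :: u2) ++ [':', ':'] ++ v = c :: (u2 ++ [':', ':'] ++ v) by simp]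
    rw [hstep d, ih hu2 v _]
    have hds : (if c = '<' then d + 1 else if c = '>' then d - 1 else d) + nsDelta u2 =
        d + nsDelta (c :: u2) := by
      rw [nsDelta_cons]; split_ifs <;> ring
    rw [hds]
    by_cases hz : d + nsDelta (c :: u2) = 0
    · rw [if_pos hz, if_pos hz]
      simp [prependHead]
    · rw [if_neg hz, if_neg hz, prependHead_prependHead]
      simp

-- B's fold over the fragments computes nsSpec
lemma foldB : ∀ (n : Nat) (t : List Char) (parts : List (List Char)) (d : Int)
    (cur : Option (List Char)), t.length ≤ n →
    finishB ((nsFrag t).foldl splitNsStep (parts, d, cur)) = parts ++ pend2 cur (nsSpec t d) := by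
  intro n
  induction n with
  | zero =>
    intro t parts d cur h
    have ht : t = [] := List.eq_nil_of_length_eq_zero (Nat.le_zero.mp h)
    subst ht
    cases cur <;>
      simp only [nsFrag, nsSpec, List.foldl_cons, List.foldl_nil, splitNsStep,
        count_singleton, List.count_nil, pend2, prependHead] <;>
      split_ifs <;>
      simp [finishB]
  | succ n ih =>
    intro t parts d cur h
    by_cases hocc : [':', ':'] <:+: t
    · obtain ⟨u, v, huv, hu⟩ := infix_decomp t hocc
      subst huv
      rw [nsFrag_append u v hu, nsSpec_append u hu v d, List.foldl_cons]
      have hv : v.length ≤ n := by simp at h; omega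
      rw [show splitNsStep (parts, d, cur) u =
          (let current := match cur with
            | none => u
            | some p => p ++ [':', ':'] ++ u
          if d + nsDelta u = 0 then (parts ++ [current], d + nsDelta u, none)
          else (parts, d + nsDelta u, some current)) by
        simp [splitNsStep, count_singleton, nsDelta]]
      by_cases hz : d + nsDelta u = 0
      · rw [if_pos hz]
        rw [ih v _ _ _ hv]
        cases cur <;> simp [pend2, prependHead, hz]
      · rw [if_neg hz]
        rw [ih v _ _ _ hv]
        cases cur <;>
          cases hx : nsSpec v (d + nsDelta u) <;>
          simp [pend2, prependHead, hz]
    · rw [nsFrag_of_not_infix t hocc, nsSpec_of_not_infix t hocc d]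
      cases cur <;>
        simp only [List.foldl_cons, List.foldl_nil, splitNsStep, count_singleton, pend2,
          prependHead] <;>
        rw [show ((t.count '<' : Int) - (t.count '>' : Int)) = nsDelta t from rfl] <;>
        split_ifs <;>
        simp [finishB]

-- A's index loop computes nsSpec
lemma nsSpec_cons (c : Char) (rest : List Char) (d : Int)
    (hg : ¬ (c = ':' ∧ d = 0 ∧ rest.head? = some ':')) :
    nsSpec (c :: rest) d =
      if c = '<' then prependHead [c] (nsSpec rest (d + 1))
      else if c = '>' then prependHead [c] (nsSpec rest (d - 1))
      else prependHead [c] (nsSpec rest d) := by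
  rw [nsSpec.eq_def]
  simp only [hg, if_false]

lemma nsSpec_split (t : List Char) : nsSpec (':' :: ':' :: t) 0 = [] :: nsSpec t 0 := by
  rw [nsSpec.eq_def]
  simp

lemma loopA (s : List Char) : ∀ (fuel : Nat) (parts : List (List Char)) (d : Int)
    (start i : Nat), s.length - i < fuel → start ≤ i → i ≤ s.length →
    splitNsLoop s fuel parts d start i =
      parts ++ prependHead ((s.take i).drop start) (nsSpec (s.drop i) d) := by
  intro fuel
  induction fuel with
  | zero => intro parts d start i hf; omega
  | succ f ih =>
    intro parts d start i hf hsi hil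
    by_cases hlt : i < s.length
    · have hdropi : s.drop i = s[i] :: s.drop (i + 1) := List.drop_eq_getElem_cons hlt
      have htake : (s.take (i + 1)).drop start = (s.take i).drop start ++ [s[i]] := by
        rw [List.take_add_one, List.getElem?_eq_getElem hlt]
        rw [List.drop_append_of_le_length (by simp; omega)]
        rfl
      rw [splitNsLoop, dif_pos hlt]
      by_cases hc1 : s[i] = '<'
      · rw [if_pos hc1, ih parts (d + 1) start (i + 1) (by omega) (by omega) (by omega)]
        rw [htake, hdropi, hc1, nsSpec_cons '<' _ d (by simp), if_pos rfl,
          ← prependHead_prependHead]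
      · rw [if_neg hc1]
        by_cases hc2 : s[i] = '>'
        · rw [if_pos hc2, ih parts (d - 1) start (i + 1) (by omega) (by omega) (by omega)]
          rw [htake, hdropi, hc2, nsSpec_cons '>' _ d (by simp), if_neg (by decide),
            if_pos rfl, ← prependHead_prependHead]
        · rw [if_neg hc2]
          by_cases hc3 : s[i] = ':' ∧ d = 0 ∧ i + 1 < s.length ∧
              PySem.List.pyGet? s ((i : Int) + 1) = some ':'
          · obtain ⟨hcol, hd0, hi1, hnext⟩ := hc3
            have hget : s[i + 1]? = some ':' := by
              rw [show ((i : Int) + 1) = ((i + 1 : Nat) : Int) by push_cast; ring] at hnext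
              rwa [PySem.List.pyGet?_natCast] at hnext
            have hnx : s[i + 1] = ':' := by
              rw [List.getElem?_eq_getElem hi1] at hget
              simpa using hget
            rw [if_pos ⟨hcol, hd0, hi1, hnext⟩]
            rw [ih (parts ++ [PySem.List.slice s (some (start : Int)) (some (i : Int))])
              d (i + 2) (i + 2) (by omega) le_rfl (by omega)]
            have hde : (s.take (i + 2)).drop (i + 2) = [] := by
              rw [List.drop_eq_nil_iff]
              simp
            rw [hde, prependHead_nil _ (nsSpec_ne_nil _ _)]
            have hdropi1 : s.drop (i + 1) = s[i + 1] :: s.drop (i + 2) :=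
              List.drop_eq_getElem_cons hi1
            subst hd0
            rw [hdropi, hdropi1, hcol, hnx, nsSpec_split]
            simp [prependHead, PySem.List.slice_natCast, List.drop_take]
          · rw [if_neg hc3, ih parts d start (i + 1) (by omega) (by omega) (by omega)]
            have hguard : ¬ (s[i] = ':' ∧ d = 0 ∧ (s.drop (i + 1)).head? = some ':') := by
              rintro ⟨hcol, hd0, hh⟩
              rw [List.head?_drop] at hh
              have hi1 : i + 1 < s.length := (List.getElem?_eq_some_iff.mp hh).1
              apply hc3
              refine ⟨hcol, hd0, hi1, ?_⟩
              rw [show ((i : Int) + 1) = ((i + 1 : Nat) : Int) by push_cast; ring,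
                PySem.List.pyGet?_natCast]
              exact hh
            rw [htake, hdropi, nsSpec_cons _ _ d hguard, if_neg hc1, if_neg hc2,
              ← prependHead_prependHead]
    · have hieq : i = s.length := by omega
      rw [splitNsLoop, dif_neg hlt, PySem.List.slice_from_natCast]
      rw [hieq, List.drop_length, List.take_length, nsSpec.eq_def]
      simp [prependHead]

-- ===== VERDICT (by name: the statement is the Claim_ definition above) =====
theorem split_ns_py_spec : Claim_equal_split_ns_py := by
  intro q _hdom
  unfold Spec_split_ns_py split_ns_py split_ns_py_alt
  rw [loopA q.toList (q.toList.length + 1) [] 0 0 0 (by omega) le_rfl (Nat.zero_le _)]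
  rw [splitOn_eq_nsFrag]
  have hb := foldB q.toList.length q.toList [] 0 none le_rfl
  simp only [finishB, pend2] at hb ⊢
  rw [hb]
  simp [prependHead_nil _ (nsSpec_ne_nil _ _)]
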